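-- pv_equiv track=rewrite | github.com/valerpenko/EOlymp | _3dMatches.py | matchesForUpgrade
-- ===== SOURCE A (Python) =====
-- def matchesForUpgrade(n_rest,width,height):
--     # trying to build 1 layer of cubes under width x height plateu
--     # returns
--     # 1 match count for upgrade to build n_rest cubes
--     # 2 count of remain cubes
--     matches=8
--     cubes_added = 1
--     n_rest -= 1
--     if cubes_added==width*height or n_rest==0:
--         return matches, n_rest
--     distance=0
--     while cubes_added<width*height:
--         matches+=5
--         cubes_added+=1
--         n_rest-=1
--         if cubes_added==width*height or n_rest==0:
--             return matches, n_rest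
--         #=====================
--         for i in range(distance):
--             matches += 3
--             cubes_added += 1
--             n_rest -= 1
--             if cubes_added==width*height or n_rest==0:
--                 return matches, n_rest
--         #====================
--         matches+=5
--         cubes_added+=1
--         n_rest-=1
--         if cubes_added==width*height or n_rest==0:
--             return matches, n_rest
--         #======================
--         distance += 1
--         for i in range(distance):
--             matches += 3
--             cubes_added += 1
--             n_rest -= 1
--             if cubes_added==width*height or n_rest==0:
--                 return matches, n_rest
--         #======================
--     return matches, n_rest
-- ===== SOURCE B (Python) =====
-- # Closed-form: A lays cubes one by one in a spiral; full iterations end at square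
-- # numbers, so the stop index c gives s with s*s < c <= (s+1)*(s+1) and the match
-- # total is a quadratic in s plus a linear tail -- O(sqrt c) instead of A's O(c).
-- def _core(m, n_rest):
--     if m <= 1:
--         return 8, n_rest - 1
--     c = n_rest if 1 <= n_rest < m else m
--     if c == 1:
--         return 8, n_rest - 1
--     s = 1
--     while (s + 1) * (s + 1) < c:
--         s += 1
--     r = c - s * s
--     cost = 3 * r + 2 if r <= s else 3 * r + 4
--     return 3 * s * s + 4 * s + 1 + cost, n_rest - c
--
-- def matchesForUpgrade(n_rest, width, height):
--     return _core(width * height, n_rest)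
-- ===== Notes on version B (the rewrite author's own statement) =====
-- stated objective: faster
-- what changed: A lays cubes one at a time in nested while/for loops, counting matches per cube; B computes the stop index c = min-like of n_rest and width*height directly, finds its integer square root s by a short scan, and returns the match total as a closed-form quadratic in s plus a linear tail.
import Mathlib
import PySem

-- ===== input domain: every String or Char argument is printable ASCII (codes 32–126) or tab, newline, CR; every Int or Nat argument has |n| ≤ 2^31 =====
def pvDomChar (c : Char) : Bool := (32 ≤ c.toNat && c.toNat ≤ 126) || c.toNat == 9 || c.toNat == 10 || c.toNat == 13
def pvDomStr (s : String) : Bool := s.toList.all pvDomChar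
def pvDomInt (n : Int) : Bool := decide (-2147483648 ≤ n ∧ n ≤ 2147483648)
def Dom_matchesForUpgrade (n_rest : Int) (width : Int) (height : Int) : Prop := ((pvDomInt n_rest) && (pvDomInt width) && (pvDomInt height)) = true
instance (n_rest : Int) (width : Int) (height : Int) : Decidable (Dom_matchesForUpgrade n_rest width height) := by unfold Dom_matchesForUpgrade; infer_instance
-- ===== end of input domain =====

-- B replaces A's cube-by-cube spiral simulation with closed-form arithmetic on the
-- stop index (its integer square root is found by a short scan): objective = faster.

-- ===== PORT A =====
-- the inner `for i in range(distance)` loop of A: .inl = early return, .inr = fall through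
def aFor : Nat → Int → Int → Int → Int → Sum (List Int) (Int × Int × Int)
  | 0, mt, cubes, n, _ => .inr (mt, cubes, n)
  | d + 1, mt, cubes, n, m =>
    let mt := mt + 3
    let cubes := cubes + 1
    let n := n - 1
    if cubes = m ∨ n = 0 then .inl [mt, n]
    else aFor d mt cubes n m

-- needed by aWhile's termination proof (the for-loop adds its length to cubes_added)
theorem aFor_inr_cubes (d : Nat) : ∀ (mt cubes n m a b c : Int),
    aFor d mt cubes n m = .inr (a, b, c) → b = cubes + d := by
  induction d with
  | zero => intro mt cubes n m a b c h; simp [aFor] at h; omega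
  | succ k ih =>
    intro mt cubes n m a b c h
    simp only [aFor] at h
    split at h
    · simp at h
    · have := ih _ _ _ _ _ _ _ h; push_cast [this]; ring

-- the Python `while cubes_added < width*height` loop of A
def aWhile (mt cubes n : Int) (d : Nat) (m : Int) : List Int :=
  if _hlt : cubes < m then
    let m1 := mt + 5
    let c1 := cubes + 1
    let n1 := n - 1
    if c1 = m ∨ n1 = 0 then [m1, n1]
    else
      match h1 : aFor d m1 c1 n1 m with
      | .inl r => r
      | .inr (m2, c2, n2) =>
        let m3 := m2 + 5
        let c3 := c2 + 1
        let n3 := n2 - 1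
        if c3 = m ∨ n3 = 0 then [m3, n3]
        else
          match h2 : aFor (d + 1) m3 c3 n3 m with
          | .inl r => r
          | .inr (m4, c4, n4) => aWhile m4 c4 n4 (d + 1) m
  else [mt, n]
termination_by (m - cubes).toNat
decreasing_by
  have hb2 := aFor_inr_cubes d _ _ _ _ _ _ _ h1
  have hb4 := aFor_inr_cubes (d + 1) _ _ _ _ _ _ _ h2
  push_cast at hb2 hb4
  omega

def matchesForUpgrade (n_rest : Int) (width : Int) (height : Int) : List Int :=
  let mt : Int := 8
  let cubes : Int := 1
  let n := n_rest - 1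
  if cubes = width * height ∨ n = 0 then [mt, n]
  else aWhile mt cubes n 0 (width * height)

-- ===== PORT B =====
-- the `while (s+1)*(s+1) < c: s += 1` scan of Source B
def scanS (c : Int) (s : Int) : Int :=
  if h : (s + 1) * (s + 1) < c then scanS c (s + 1) else s
termination_by (c - s).toNat
decreasing_by
  have hs : s < c := by nlinarith [mul_self_nonneg (2 * s + 1)]
  omega

-- Source B's _core(m, n_rest)
def bCore (m n_rest : Int) : List Int :=
  if m ≤ 1 then [8, n_rest - 1]
  else
    let c := if 1 ≤ n_rest ∧ n_rest < m then n_rest else m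
    if c = 1 then [8, n_rest - 1]
    else
      let s := scanS c 1
      let r := c - s * s
      [3 * s * s + 4 * s + 1 + (if r ≤ s then 3 * r + 2 else 3 * r + 4), n_rest - c]

def matchesForUpgrade_alt (n_rest : Int) (width : Int) (height : Int) : List Int :=
  bCore (width * height) n_rest

-- ===== PRECONDITION & SPEC =====
def Spec_matchesForUpgrade (n_rest : Int) (width : Int) (height : Int) (out : List Int) : Prop := out = matchesForUpgrade_alt n_rest width height
instance (n_rest : Int) (width : Int) (height : Int) (out : List Int) : Decidable (Spec_matchesForUpgrade n_rest width height out) := by unfold Spec_matchesForUpgrade; infer_instance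

-- ===== CLAIM (what is proved, stated in full; the proofs are below) =====
def Claim_equal_matchesForUpgrade : Prop := ∀ (n_rest : Int) (width : Int) (height : Int), Dom_matchesForUpgrade n_rest width height → Spec_matchesForUpgrade n_rest width height (matchesForUpgrade n_rest width height)

-- ===== LEMMAS AND PROOFS =====

theorem scanS_eq (c t : Int) (ht1 : 1 ≤ t) (ht : t * t < c) (htc : c ≤ (t + 1) * (t + 1)) :
    ∀ (k : Nat) (s : Int), 1 ≤ s → s ≤ t → (t - s).toNat = k → s * s < c → scanS c s = t := by
  intro k
  induction k with
  | zero =>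
    intro s hs1 hst hk hsc
    have hset : s = t := by omega
    subst hset
    rw [scanS]
    simp [not_lt.mpr htc]
  | succ k ih =>
    intro s hs1 hst hk hsc
    have hlt : s < t := by omega
    have hmono : (s + 1) * (s + 1) ≤ t * t := by nlinarith
    rw [scanS]
    rw [dif_pos (lt_of_le_of_lt hmono ht)]
    exact ih (s + 1) (by omega) (by omega) (by omega) (lt_of_le_of_lt hmono ht)

-- if no cube in the next d placements hits width*height or exhausts n_rest, the for-loop falls through
theorem aFor_clean (d : Nat) : ∀ (mt cubes m n0 : Int),
    (∀ j : Int, 1 ≤ j → j ≤ (d : Int) → cubes + j ≠ m ∧ cubes + j ≠ n0) →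
    aFor d mt cubes (n0 - cubes) m = .inr (mt + 3 * d, cubes + d, n0 - (cubes + d)) := by
  induction d with
  | zero => intro mt cubes m n0 _; simp [aFor]
  | succ k ih =>
    intro mt cubes m n0 h
    have h1 := h 1 (by omega) (by push_cast; omega)
    simp only [aFor]
    rw [if_neg (by omega)]
    rw [show n0 - cubes - 1 = n0 - (cubes + 1) by ring]
    rw [ih (mt + 3) (cubes + 1) m n0 (by
      intro j hj1 hj2
      have := h (j + 1) (by omega) (by push_cast at hj2 ⊢; omega)
      constructor <;> omega)]
    push_cast
    refine congrArg _ ?_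
    refine Prod.ext (by ring) (Prod.ext (by ring) (by ring))

-- if the r-th of the next d placements is the first to hit width*height or exhaust n_rest, the for-loop returns there
theorem aFor_stop : ∀ (r d : Nat) (mt cubes m n0 : Int), 1 ≤ r → r ≤ d →
    (cubes + r = m ∨ cubes + r = n0) →
    (∀ j : Int, 1 ≤ j → j < (r : Int) → cubes + j ≠ m ∧ cubes + j ≠ n0) →
    aFor d mt cubes (n0 - cubes) m = .inl [mt + 3 * r, n0 - (cubes + r)] := by
  intro r
  induction r with
  | zero => omega
  | succ k ih =>
    intro d mt cubes m n0 _ hrd hstop hpre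
    obtain ⟨d', rfl⟩ : ∃ d', d = d' + 1 := ⟨d - 1, by omega⟩
    by_cases hk : k = 0
    · subst hk
      simp only [aFor]
      rw [if_pos (by push_cast at hstop ⊢; omega)]
      push_cast
      have e2 : n0 - cubes - 1 = n0 - (cubes + 1) := by ring
      rw [e2]
    · have hk1 : 1 ≤ k := by omega
      simp only [aFor]
      have hfirst := hpre 1 (by omega) (by push_cast; omega)
      rw [if_neg (by omega)]
      rw [show n0 - cubes - 1 = n0 - (cubes + 1) by ring]
      rw [ih d' (mt + 3) (cubes + 1) m n0 hk1 (by omega)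
        (by push_cast at hstop ⊢; omega)
        (by intro j hj1 hj2
            have := hpre (j + 1) (by omega) (by push_cast at hj2 ⊢; omega)
            constructor <;> omega)]
      push_cast
      refine congrArg _ ?_
      simp only [List.cons.injEq]
      refine ⟨by ring, by ring, trivial⟩

-- value of B when the stop index c lies in ((D+1)^2, (D+2)^2]
theorem bCore_val (m n0 D c : Int) (hD : 0 ≤ D)
    (hc : c = if 1 ≤ n0 ∧ n0 < m then n0 else m)
    (hm : 1 < m)
    (hcl : (D + 1) * (D + 1) < c) (hcu : c ≤ (D + 2) * (D + 2)) :
    bCore m n0 = [3 * (D + 1) * (D + 1) + 4 * (D + 1) + 1 +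
      (if c - (D + 1) * (D + 1) ≤ D + 1 then 3 * (c - (D + 1) * (D + 1)) + 2
       else 3 * (c - (D + 1) * (D + 1)) + 4), n0 - c] := by
  have h1c : 1 < c := by nlinarith
  have hs : scanS c 1 = D + 1 := by
    refine scanS_eq c (D + 1) (by omega) hcl (by nlinarith) D.toNat 1 le_rfl (by omega) (by omega) (by omega)
  simp only [bCore, if_neg (show ¬ m ≤ 1 by omega)]
  rw [← hc, if_neg (show ¬ c = 1 by omega), hs]

-- loop invariant: entering the while loop with distance d, cubes_added = (d+1)^2,
-- matches = 3d^2+10d+8 and no stop reached yet, A's loop computes B's closed form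
theorem whileL : ∀ (K : Nat) (d : Nat) (m n0 : Int),
    (m - ((d : Int) + 1) * ((d : Int) + 1)).toNat ≤ K →
    ((d : Int) + 1) * ((d : Int) + 1) < m →
    (n0 ≤ 0 ∨ ((d : Int) + 1) * ((d : Int) + 1) < n0) →
    aWhile (3 * (d : Int) * (d : Int) + 10 * (d : Int) + 8) (((d : Int) + 1) * ((d : Int) + 1))
      (n0 - ((d : Int) + 1) * ((d : Int) + 1)) d m = bCore m n0 := by
  intro K
  induction K with
  | zero =>
    intro d m n0 hK hm _
    exfalso
    have h1 : (1:Int) ≤ ((d : Int) + 1) * ((d : Int) + 1) := by nlinarith [Int.natCast_nonneg d, mul_self_nonneg ((d:Int))]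
    omega
  | succ K ih =>
    intro d m n0 hK hm hn
    have hD0 : (0:Int) ≤ (d : Int) := Int.natCast_nonneg d
    set D := (d : Int) with hDdef
    set C := (D + 1) * (D + 1) with hCdef
    have hE : (D + 2) * (D + 2) = C + 2 * D + 3 := by rw [hCdef]; ring
    have hC1 : (1:Int) ≤ C := by rw [hCdef]; nlinarith [hD0, mul_self_nonneg D]
    set c := if 1 ≤ n0 ∧ n0 < m then n0 else m with hc
    have hcdisj : (1 ≤ n0 ∧ n0 < m ∧ c = n0) ∨ ((n0 ≤ 0 ∨ m ≤ n0) ∧ c = m) := by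
      rw [hc]; split_ifs with h
      · exact .inl ⟨h.1, h.2, rfl⟩
      · exact .inr ⟨by omega, rfl⟩
    have hclC : C < c := by rcases hcdisj with ⟨h1, h2, h3⟩ | ⟨h1, h3⟩ <;> omega
    have hcm : c ≤ m := by rcases hcdisj with ⟨h1, h2, h3⟩ | ⟨h1, h3⟩ <;> omega
    have hm1 : (1:Int) < m := by omega
    rw [aWhile, dif_pos hm]
    simp only []
    by_cases hq1 : c = C + 1
    · -- stop at the first `matches += 5` cube
      rw [if_pos (by rcases hcdisj with ⟨h1, h2, h3⟩ | ⟨h1, h3⟩ <;> omega)]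
      rw [bCore_val m n0 D c hD0 hc hm1 hclC (by rw [hE]; omega)]
      rw [if_pos (by omega)]
      simp only [List.cons.injEq]
      refine ⟨?_, ?_, trivial⟩
      · rw [hq1, hCdef]; ring
      · omega
    · have hnof1 : ¬ (C + 1 = m ∨ n0 - C - 1 = 0) := by
        rcases hcdisj with ⟨h1, h2, h3⟩ | ⟨h1, h3⟩ <;> omega
      rw [if_neg hnof1]
      rw [show n0 - C - 1 = n0 - (C + 1) from by ring]
      by_cases hq2 : c ≤ C + 1 + D
      · -- stop inside the first inner for-loop
        have hrr : (((c - C - 1).toNat : Int)) = c - C - 1 := by omega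
        rw [aFor_stop (c - C - 1).toNat d _ (C + 1) m n0 (by omega) (by omega)
          (by rw [hrr]; rcases hcdisj with ⟨h1, h2, h3⟩ | ⟨h1, h3⟩ <;> omega)
          (by intro j hj1 hj2
              rw [hrr] at hj2
              rcases hcdisj with ⟨h1, h2, h3⟩ | ⟨h1, h3⟩ <;> constructor <;> omega)]
        simp only []
        rw [bCore_val m n0 D c hD0 hc hm1 hclC (by rw [hE]; omega)]
        rw [if_pos (by omega)]
        simp only [List.cons.injEq]
        refine ⟨?_, ?_, trivial⟩
        · rw [hrr, hCdef]; ring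
        · rw [hrr]; ring
      · -- the first for-loop completes
        have hclean1 : ∀ j : Int, 1 ≤ j → j ≤ (d : Int) → C + 1 + j ≠ m ∧ C + 1 + j ≠ n0 := by
          intro j hj1 hj2
          rw [← hDdef] at hj2
          rcases hcdisj with ⟨h1, h2, h3⟩ | ⟨h1, h3⟩ <;> constructor <;> omega
        rw [aFor_clean d _ (C + 1) m n0 hclean1]
        simp only []
        by_cases hq3 : c = C + D + 2
        · -- stop at the second `matches += 5` cube
          rw [if_pos (by rw [← hDdef]; rcases hcdisj with ⟨h1, h2, h3⟩ | ⟨h1, h3⟩ <;> omega)]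
          rw [bCore_val m n0 D c hD0 hc hm1 hclC (by rw [hE]; omega)]
          rw [if_neg (by omega)]
          simp only [List.cons.injEq]
          refine ⟨?_, ?_, trivial⟩
          · rw [← hDdef, hq3, hCdef]; ring
          · rw [← hDdef]; omega
        · have hnof2 : ¬ (C + 1 + (d : Int) + 1 = m ∨ n0 - (C + 1 + (d : Int)) - 1 = 0) := by
            rw [← hDdef]
            rcases hcdisj with ⟨h1, h2, h3⟩ | ⟨h1, h3⟩ <;> omega
          rw [if_neg hnof2]
          rw [show n0 - (C + 1 + (d : Int)) - 1 = n0 - (C + 1 + (d : Int) + 1) from by ring]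
          by_cases hq4 : c ≤ C + 2 * D + 3
          · -- stop inside the second inner for-loop
            have hrr2 : (((c - C - D - 2).toNat : Int)) = c - C - D - 2 := by omega
            rw [aFor_stop (c - C - D - 2).toNat (d + 1) _ (C + 1 + (d : Int) + 1) m n0
              (by omega) (by omega)
              (by rw [hrr2, ← hDdef]; rcases hcdisj with ⟨h1, h2, h3⟩ | ⟨h1, h3⟩ <;> omega)
              (by intro j hj1 hj2
                  rw [hrr2] at hj2
                  rw [← hDdef]
                  rcases hcdisj with ⟨h1, h2, h3⟩ | ⟨h1, h3⟩ <;> constructor <;> omega)]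
            simp only []
            rw [bCore_val m n0 D c hD0 hc hm1 hclC (by rw [hE]; omega)]
            rw [if_neg (by omega)]
            simp only [List.cons.injEq]
            refine ⟨?_, ?_, trivial⟩
            · rw [hrr2, ← hDdef, hCdef]; ring
            · rw [hrr2, ← hDdef]; ring
          · -- no stop this round: one more while iteration
            have hc5 : C + 2 * D + 4 ≤ c := by omega
            have hclean2 : ∀ j : Int, 1 ≤ j → j ≤ ((d + 1 : Nat) : Int) →
                C + 1 + (d : Int) + 1 + j ≠ m ∧ C + 1 + (d : Int) + 1 + j ≠ n0 := by
              intro j hj1 hj2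
              push_cast at hj2
              rw [← hDdef] at hj2
              rcases hcdisj with ⟨h1, h2, h3⟩ | ⟨h1, h3⟩ <;> constructor <;> omega
            rw [aFor_clean (d + 1) _ (C + 1 + (d : Int) + 1) m n0 hclean2]
            simp only []
            have hE' : (((d + 1 : Nat) : Int) + 1) * (((d + 1 : Nat) : Int) + 1) = C + 2 * D + 3 := by
              push_cast
              rw [← hDdef, hCdef]
              ring
            have hK' : (m - (((d + 1 : Nat) : Int) + 1) * (((d + 1 : Nat) : Int) + 1)).toNat ≤ K := by
              rw [hE']; omega
            have hm' : (((d + 1 : Nat) : Int) + 1) * (((d + 1 : Nat) : Int) + 1) < m := by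
              rw [hE']; omega
            have hn' : n0 ≤ 0 ∨ (((d + 1 : Nat) : Int) + 1) * (((d + 1 : Nat) : Int) + 1) < n0 := by
              rw [hE']
              rcases hcdisj with ⟨h1, h2, h3⟩ | ⟨h1, h3⟩ <;> omega
            have hres := ih (d + 1) m n0 hK' hm' hn'
            convert hres using 2
            · push_cast; rw [← hDdef]; ring
            · push_cast; rw [← hDdef, hCdef]; ring
            · push_cast; rw [← hDdef, hCdef]; ring

theorem main_eq (n_rest width height : Int) :
    matchesForUpgrade n_rest width height = matchesForUpgrade_alt n_rest width height := by
  simp only [matchesForUpgrade, matchesForUpgrade_alt]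
  by_cases h1 : ((1:Int) = width * height ∨ n_rest - 1 = 0)
  · rw [if_pos h1]
    rcases h1 with h1 | h1
    · simp only [bCore, if_pos (show width * height ≤ 1 by omega)]
    · by_cases hm : width * height ≤ 1
      · simp only [bCore, if_pos hm]
      · simp only [bCore, if_neg hm]
        rw [if_pos (show (1:Int) ≤ n_rest ∧ n_rest < width * height by omega)]
        rw [if_pos (show n_rest = 1 by omega)]
  · rw [if_neg h1]
    by_cases hm2 : width * height ≤ 1
    · rw [aWhile, dif_neg (show ¬ (1:Int) < width * height by omega)]
      simp only [bCore, if_pos hm2]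
    · have hres := whileL (width * height - 1).toNat 0 (width * height) n_rest
        (by norm_num) (by push_cast; omega) (by push_cast; omega)
      norm_num at hres
      exact hres

-- ===== VERDICT (by name: the statement is the Claim_ definition above) =====
theorem matchesForUpgrade_spec : Claim_equal_matchesForUpgrade := by
  intro n_rest width height _
  unfold Spec_matchesForUpgrade
  exact main_eq n_rest width height
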